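-- pv_equiv track=rewrite | github.com/ayeh11/battleship | grids.py | get_around_zone
-- ===== SOURCE A (Python) =====
-- def get_around_zone(shipself_num, length, ori):
--     around_zone = []
--
--     top_side = False
--     left_side = False
--     bottom_side = False
--     right_side = False
--
--     n1 = shipself_num[0]
--
--     if n1[0] == 0:
--         top_side = True
--     if n1[1] == 0:
--         left_side = True
--
--     if ori == 0:
--         if n1[0] == 9:
--             bottom_side = True
--         if n1[1] == 10 - length:
--             right_side = True
--     else:
--         if n1[0] == 10 - length:
--             bottom_side = True
--         if n1[1] == 9:
--             right_side = True
--
--     if ori == 0: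
--         if not left_side:
--             others = (n1[0], n1[1] -1)
--             around_zone.append(others)
--         if not right_side:
--             others = (n1[0], n1[1] +length)
--             around_zone.append(others)
--         if not top_side:
--             for s in shipself_num:
--                 others = (n1[0]-1, s[1])
--                 around_zone.append(others)
--         if not bottom_side:
--             for s in shipself_num:
--                 others = (n1[0]+1, s[1])
--                 around_zone.append(others)
--     else:
--         if not left_side:
--             for s in shipself_num:
--                 others = (s[0], n1[1] -1)
--                 around_zone.append(others)
--         if not right_side:
--             for s in shipself_num:
--                 others = (s[0], n1[1] +1)
--                 around_zone.append(others)
--         if not top_side: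
--             others = (n1[0]-1, n1[1])
--             around_zone.append(others)
--         if not bottom_side:
--             others = (n1[0]+length, n1[1])
--             around_zone.append(others)
--
--     return around_zone
-- ===== SOURCE B (Python) =====
-- def get_around_zone(shipself_num, length, ori):
--     # one computation for both orientations: transpose coordinates for vertical ships
--     cells = shipself_num if ori == 0 else [(c, r) for (r, c) in shipself_num]
--     r, c = cells[0]
--     ends = []
--     if c != 0:
--         ends.append((r, c - 1))
--     if c != 10 - length:
--         ends.append((r, c + length))
--     side = []
--     if r != 0:
--         side += [(r - 1, y) for (_, y) in cells]
--     if r != 9: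
--         side += [(r + 1, y) for (_, y) in cells]
--     if ori == 0:
--         return ends + side
--     return [(y, x) for (x, y) in side + ends]
-- ===== Notes on version B (the rewrite author's own statement) =====
-- stated objective: simpler
-- what changed: B drops the top/left/bottom/right flag machinery and the duplicated per-orientation branches: it transposes coordinates for vertical ships, computes end cells and side rows once, and transposes back, matching A's exact order.
import Mathlib
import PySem

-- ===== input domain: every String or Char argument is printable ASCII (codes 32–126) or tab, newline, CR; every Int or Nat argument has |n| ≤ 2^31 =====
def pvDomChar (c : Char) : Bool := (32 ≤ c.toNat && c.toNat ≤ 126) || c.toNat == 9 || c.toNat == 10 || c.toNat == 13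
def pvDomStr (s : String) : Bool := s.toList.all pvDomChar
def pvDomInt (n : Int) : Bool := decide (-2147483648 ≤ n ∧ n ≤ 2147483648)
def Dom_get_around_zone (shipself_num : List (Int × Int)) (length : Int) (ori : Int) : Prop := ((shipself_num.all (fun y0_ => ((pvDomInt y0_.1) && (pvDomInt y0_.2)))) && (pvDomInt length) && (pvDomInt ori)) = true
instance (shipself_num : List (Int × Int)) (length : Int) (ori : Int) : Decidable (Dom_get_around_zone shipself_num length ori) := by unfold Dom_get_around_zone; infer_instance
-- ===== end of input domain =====

-- B replaces A's four boundary flags and duplicated orientation branches by one computation that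
-- transposes coordinates for vertical ships (objective: simpler).



-- ===== PORT A =====
-- A raises IndexError on the empty list (shipself_num[0]); Pre_ excludes it, [] is a dummy.
def get_around_zone (shipself_num : List (Int × Int)) (length : Int) (ori : Int) : List (Int × Int) :=
  match shipself_num with
  | [] => []
  | n1 :: _ =>
    let top_side : Bool := n1.1 = 0
    let left_side : Bool := n1.2 = 0
    let bottom_side : Bool := if ori = 0 then n1.1 = 9 else n1.1 = 10 - length
    let right_side : Bool := if ori = 0 then n1.2 = 10 - length else n1.2 = 9
    if ori = 0 then
      (if ¬ left_side then [(n1.1, n1.2 - 1)] else []) ++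
      (if ¬ right_side then [(n1.1, n1.2 + length)] else []) ++
      (if ¬ top_side then shipself_num.map (fun s => (n1.1 - 1, s.2)) else []) ++
      (if ¬ bottom_side then shipself_num.map (fun s => (n1.1 + 1, s.2)) else [])
    else
      (if ¬ left_side then shipself_num.map (fun s => (s.1, n1.2 - 1)) else []) ++
      (if ¬ right_side then shipself_num.map (fun s => (s.1, n1.2 + 1)) else []) ++
      (if ¬ top_side then [(n1.1 - 1, n1.2)] else []) ++
      (if ¬ bottom_side then [(n1.1 + length, n1.2)] else [])

-- ===== PORT B =====
-- B: transpose coordinates for vertical ships, compute once, transpose back.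
def get_around_zone_alt (shipself_num : List (Int × Int)) (length : Int) (ori : Int) : List (Int × Int) :=
  let cells := if ori = 0 then shipself_num else shipself_num.map (fun p => (p.2, p.1))
  match cells with
  | [] => []
  | (r, c) :: _ =>
    let ends :=
      (if c ≠ 0 then [(r, c - 1)] else []) ++
      (if c ≠ 10 - length then [(r, c + length)] else [])
    let side :=
      (if r ≠ 0 then cells.map (fun p => (r - 1, p.2)) else []) ++
      (if r ≠ 9 then cells.map (fun p => (r + 1, p.2)) else [])
    if ori = 0 then ends ++ side
    else (side ++ ends).map (fun p => (p.2, p.1))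

-- ===== PRECONDITION & SPEC =====
-- A raises IndexError on shipself_num = [] (shipself_num[0]); B raises there too.
def Pre_get_around_zone (shipself_num : List (Int × Int)) (_length : Int) (_ori : Int) : Prop := shipself_num ≠ []
instance (shipself_num : List (Int × Int)) (length : Int) (ori : Int) : Decidable (Pre_get_around_zone shipself_num length ori) := by unfold Pre_get_around_zone; infer_instance
def pvWitness_get_around_zone : (List (Int × Int)) × Int × Int := ([(3, 4), (3, 5)], 2, 0)
def Spec_get_around_zone (shipself_num : List (Int × Int)) (length : Int) (ori : Int) (out : List (Int × Int)) : Prop := out = get_around_zone_alt shipself_num length ori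
instance (shipself_num : List (Int × Int)) (length : Int) (ori : Int) (out : List (Int × Int)) : Decidable (Spec_get_around_zone shipself_num length ori out) := by unfold Spec_get_around_zone; infer_instance

-- ===== CLAIM (what is proved, stated in full; the proofs are below) =====
def Claim_equal_get_around_zone : Prop := ∀ (shipself_num : List (Int × Int)) (length : Int) (ori : Int), Dom_get_around_zone shipself_num length ori → Pre_get_around_zone shipself_num length ori → Spec_get_around_zone shipself_num length ori (get_around_zone shipself_num length ori)

-- ===== LEMMAS AND PROOFS =====

-- ===== VERDICT (by name: the statement is the Claim_ definition above) =====
theorem get_around_zone_spec : Claim_equal_get_around_zone := by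
  intro s length ori _ hpre
  unfold Spec_get_around_zone get_around_zone get_around_zone_alt
  match s with
  | [] => exact absurd rfl hpre
  | (r0, c0) :: rest =>
    by_cases ho : ori = 0
    · simp only [ho, if_true]
      split_ifs <;> simp_all
    · simp only [if_neg ho]
      split_ifs <;> simp_all [Function.comp_def]
      rename_i h
      rw [if_neg (by omega)]
      simp [Function.comp_def]
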